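-- pv_equiv track=rewrite | github.com/pypi-data/pypi-mirror-381 | packages/microdag/microdag-1.0.1.tar.gz/microdag-1.0.1/src/core/validation/rules.py | validate_transaction_structure
-- ===== SOURCE A (Python) =====
-- from typing import Dict, Any, Optional
--
-- def validate_transaction_structure(transaction: Dict[str, Any]) -> bool:
--     """Validate basic transaction structure"""
--     try:
--         required_fields = ['type', 'account', 'signature']
--
--         # Check required fields exist
--         for field in required_fields:
--             if field not in transaction:
--                 return False
--
--         # Validate transaction type
--         valid_types = ['send', 'receive', 'genesis']
--         if transaction['type'] not in valid_types:
--             return False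
--
--         # Type-specific validation
--         tx_type = transaction['type']
--
--         if tx_type == 'send':
--             required_send_fields = ['destination', 'amount']
--             for field in required_send_fields:
--                 if field not in transaction:
--                     return False
--
--         elif tx_type == 'receive':
--             if 'link' not in transaction:
--                 return False
--
--         elif tx_type == 'genesis':
--             if 'amount' not in transaction:
--                 return False
--
--         return True
--     except Exception:
--         return False
-- ===== SOURCE B (Python) =====
-- FIELD_SETS = {
--     'send': ('type', 'account', 'signature', 'destination', 'amount'),
--     'receive': ('type', 'account', 'signature', 'link'),
--     'genesis': ('type', 'account', 'signature', 'amount'),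
-- }
--
-- def validate_transaction_structure(transaction) -> bool:
--     """Cross-off validation: walk the transaction's keys once, discarding each
--     from the full required-field set for its type; valid iff nothing is left."""
--     try:
--         required = FIELD_SETS.get(transaction.get('type'))
--         if required is None:
--             return False
--         missing = set(required)
--         for key in transaction:
--             missing.discard(key)
--         return not missing
--     except Exception:
--         return False
-- ===== Notes on version B (the rewrite author's own statement) =====
-- stated objective: alternative
-- what changed: Inverts the traversal: instead of probing the dict once per required field through if/elif branches, B looks up the full required-field set for the type in a table and makes a single pass over the transaction's own keys, crossing each off a 'missing' set; the transaction is valid iff the set is emptied.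
import Mathlib
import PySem

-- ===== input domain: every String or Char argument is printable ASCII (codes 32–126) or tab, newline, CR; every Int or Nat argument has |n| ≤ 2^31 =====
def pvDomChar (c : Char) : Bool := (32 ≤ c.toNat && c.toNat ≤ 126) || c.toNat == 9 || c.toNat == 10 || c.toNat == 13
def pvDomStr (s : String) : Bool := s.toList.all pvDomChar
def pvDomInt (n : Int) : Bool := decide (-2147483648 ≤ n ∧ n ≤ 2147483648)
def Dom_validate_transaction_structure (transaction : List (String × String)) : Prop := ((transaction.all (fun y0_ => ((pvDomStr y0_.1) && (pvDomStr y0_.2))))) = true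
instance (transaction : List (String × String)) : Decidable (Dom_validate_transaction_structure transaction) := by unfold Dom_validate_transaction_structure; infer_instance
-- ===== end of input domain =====

-- B inverts the traversal: instead of A's per-field dict probes behind if/elif type branches, B takes the full
-- required-field set for the type from a table and makes one pass over the transaction's keys, crossing each off
-- a 'missing' set; valid iff the set empties (alternative decomposition, same cost).


-- ===== PORT A =====
-- 'for field in fields: if field not in transaction: return False' (shared by all of A's loops)
def vts_fieldsLoop (transaction : List (String × String)) : List String → Bool
  | [] => true
  | f :: rest =>
    if ((PySem.Dict.mk transaction).get? f).isSome then vts_fieldsLoop transaction rest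
    else false

def validate_transaction_structure (transaction : List (String × String)) : Bool :=
  -- required-fields loop
  if vts_fieldsLoop transaction ["type", "account", "signature"] = false then false
  else
    -- transaction['type'] (present: the loop above checked it)
    match (PySem.Dict.mk transaction).get? "type" with
    | none => false
    | some tx_type =>
      if ¬ (["send", "receive", "genesis"].contains tx_type) then false
      else if tx_type == "send" then vts_fieldsLoop transaction ["destination", "amount"]
      else if tx_type == "receive" then vts_fieldsLoop transaction ["link"]
      else if tx_type == "genesis" then vts_fieldsLoop transaction ["amount"]
      else true

-- ===== PORT B =====
def vts_FIELD_SETS : List (String × List String) :=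
  [("send", ["type", "account", "signature", "destination", "amount"]),
   ("receive", ["type", "account", "signature", "link"]),
   ("genesis", ["type", "account", "signature", "amount"])]

def validate_transaction_structure_alt (transaction : List (String × String)) : Bool :=
  match (PySem.Dict.mk transaction).get? "type" with
  | none => false      -- transaction.get('type') = None: FIELD_SETS.get(None) is None → return False
  | some tx_type =>
    match (PySem.Dict.mk vts_FIELD_SETS).get? tx_type with
    | none => false
    | some required =>
      -- missing = set(required); for key in transaction: missing.discard(key); return not missing
      let missing := transaction.foldl
        (fun (m : PySem.Set String) kv => PySem.Set.discard m kv.1)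
        (PySem.Set.ofList required)
      missing.isEmpty

-- ===== PRECONDITION & SPEC =====
def Spec_validate_transaction_structure (transaction : List (String × String)) (out : Bool) : Prop := out = validate_transaction_structure_alt transaction
instance (transaction : List (String × String)) (out : Bool) : Decidable (Spec_validate_transaction_structure transaction out) := by unfold Spec_validate_transaction_structure; infer_instance

-- ===== CLAIM (what is proved, stated in full; the proofs are below) =====
def Claim_equal_validate_transaction_structure : Prop := ∀ (transaction : List (String × String)), Dom_validate_transaction_structure transaction → Spec_validate_transaction_structure transaction (validate_transaction_structure transaction)

-- ===== LEMMAS AND PROOFS =====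
-- A's field loop is an all-of-isSome test
theorem vts_fieldsLoop_eq_all (t : List (String × String)) (fs : List String) :
    vts_fieldsLoop t fs = fs.all (fun f => ((PySem.Dict.mk t).get? f).isSome) := by
  induction fs with
  | nil => rfl
  | cons f rest ih => simp [vts_fieldsLoop, List.all_cons, ih]

-- first-match lookup succeeds iff the key occurs
theorem vts_get?_isSome (t : List (String × String)) (f : String) :
    ((PySem.Dict.mk t).get? f).isSome = (t.map Prod.fst).contains f := by
  induction t with
  | nil => simp [PySem.Dict.get?]
  | cons kv rest ih =>
    rw [PySem.Dict.get?_mk_cons]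
    by_cases h : kv.1 = f
    · simp [h]
    · simp [h, ih, Ne.symm h]

-- B's cross-off loop is a filter by non-occurrence of the key
theorem vts_foldl_discard (t : List (String × String)) (m : PySem.Set String) :
    t.foldl (fun (m : PySem.Set String) kv => PySem.Set.discard m kv.1) m
      = m.filter (fun x => !(t.map Prod.fst).contains x) := by
  induction t generalizing m with
  | nil => simp
  | cons kv rest ih =>
    rw [List.foldl_cons, ih, PySem.Set.discard, List.filter_filter]
    apply List.filter_congr
    intro x _
    by_cases h : x = kv.1 <;> simp [h, Bool.and_comm]

-- 'not missing' after the cross-off = every required field occurs among the keys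
theorem vts_filter_isEmpty (s : List String) (c : String → Bool) :
    (s.filter (fun x => !c x)).isEmpty = s.all c := by
  apply Bool.eq_iff_iff.mpr
  simp [List.isEmpty_iff, List.filter_eq_nil_iff, List.all_eq_true]

-- a Set.ofList has the same members as its source, so 'all' agrees
theorem vts_ofList_all (xs : List String) (p : String → Bool) :
    (PySem.Set.ofList xs : List String).all p = xs.all p := by
  apply Bool.eq_iff_iff.mpr
  simp only [List.all_eq_true]
  constructor <;> intro h x hx
  · exact h x (by simpa [PySem.Set.mem_ofList] using hx)
  · exact h x (by simpa [PySem.Set.mem_ofList] using hx)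

-- ===== VERDICT (by name: the statement is the Claim_ definition above) =====
theorem validate_transaction_structure_spec : Claim_equal_validate_transaction_structure := by
  intro t _
  unfold Spec_validate_transaction_structure validate_transaction_structure validate_transaction_structure_alt
  have hc : ∀ f, ((PySem.Dict.mk t).get? f).isSome = (t.map Prod.fst).contains f := vts_get?_isSome t
  cases hty : (PySem.Dict.mk t).get? "type" with
  | none =>
    have : (t.map Prod.fst).contains "type" = false := by rw [← hc]; simp [hty]
    simp [vts_fieldsLoop_eq_all, List.all_cons, hc]
  | some ty =>
    have hcty : (t.map Prod.fst).contains "type" = true := by rw [← hc]; simp [hty]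
    by_cases h1 : ty = "send"
    · subst h1
      simp only [vts_FIELD_SETS, PySem.Dict.get?_mk_cons, beq_self_eq_true, if_true,
        vts_foldl_discard, vts_filter_isEmpty, vts_ofList_all,
        vts_fieldsLoop_eq_all, List.all_cons, List.all_nil, hc, hcty]
      cases (t.map Prod.fst).contains "account" <;>
        cases (t.map Prod.fst).contains "signature" <;> simp
    · by_cases h2 : ty = "receive"
      · subst h2
        simp only [vts_FIELD_SETS, PySem.Dict.get?_mk_cons, show ("send" == "receive") = false from rfl,
          beq_self_eq_true, if_true, if_false, Bool.false_eq_true,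
          vts_foldl_discard, vts_filter_isEmpty, vts_ofList_all,
          vts_fieldsLoop_eq_all, List.all_cons, List.all_nil, hc, hcty]
        cases (t.map Prod.fst).contains "account" <;>
          cases (t.map Prod.fst).contains "signature" <;> simp
      · by_cases h3 : ty = "genesis"
        · subst h3
          simp only [vts_FIELD_SETS, PySem.Dict.get?_mk_cons,
            show ("send" == "genesis") = false from rfl, show ("receive" == "genesis") = false from rfl,
            beq_self_eq_true, if_true, if_false, Bool.false_eq_true,
            vts_foldl_discard, vts_filter_isEmpty, vts_ofList_all,
            vts_fieldsLoop_eq_all, List.all_cons, List.all_nil, hc, hcty]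
          cases (t.map Prod.fst).contains "account" <;>
            cases (t.map Prod.fst).contains "signature" <;> simp
        · have : (PySem.Dict.mk vts_FIELD_SETS).get? ty = none := by
            simp [vts_FIELD_SETS, PySem.Dict.get?,
              Ne.symm h1, Ne.symm h2, Ne.symm h3]
          simp [vts_fieldsLoop_eq_all, this, h1, h2, h3]
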